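-- pv_equiv track=rewrite | github.com/presian/HackBulgaria | Programming101-3/Week_1/The_Final_Round/nan_expand.py | nan_expand
-- ===== SOURCE A (Python) =====
-- def nan_expand(times):
--     result = ""
--     if times == 0:
--         return result
--     for x in range(0, times):
--         if x == 0:
--             result += "Not a NaN"
--         else:
--             result = "Not a " + result
--     return result
-- ===== SOURCE B (Python) =====
-- def nan_expand(times):
--     if times <= 0:
--         return ""
--     return "Not a " * times + "NaN"
-- ===== Notes on version B (the rewrite author's own statement) =====
-- stated objective: faster
-- what changed: Replaces the loop that prepends 'Not a ' on each iteration (quadratic repeated concatenation) with a closed-form string multiplication guarded for non-positive counts.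
import Mathlib
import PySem

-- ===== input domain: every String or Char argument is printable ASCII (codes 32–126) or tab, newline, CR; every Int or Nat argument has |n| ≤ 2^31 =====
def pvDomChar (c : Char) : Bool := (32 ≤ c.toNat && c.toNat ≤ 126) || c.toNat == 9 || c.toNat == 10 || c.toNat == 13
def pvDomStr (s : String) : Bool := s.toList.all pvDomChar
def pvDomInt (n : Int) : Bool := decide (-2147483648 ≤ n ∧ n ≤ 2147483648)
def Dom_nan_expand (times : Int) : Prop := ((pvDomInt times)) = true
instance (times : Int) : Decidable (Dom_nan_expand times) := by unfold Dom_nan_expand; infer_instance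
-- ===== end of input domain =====

-- B replaces A's prepend-per-iteration loop with a closed-form "Not a " * times + "NaN" (simpler).

-- ===== PORT A =====
def nan_expand (times : Int) : String :=
  let result := ""
  if times == 0 then result
  else
    (PySem.List.pyRange 0 times 1).foldl
      (fun result x => if x == 0 then result ++ "Not a NaN" else "Not a " ++ result)
      result

-- ===== PORT B =====
def nan_expand_alt (times : Int) : String :=
  if times ≤ 0 then ""
  else String.join (List.replicate times.toNat "Not a ") ++ "NaN"

-- ===== PRECONDITION & SPEC =====
def Spec_nan_expand (times : Int) (out : String) : Prop := out = nan_expand_alt times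
instance (times : Int) (out : String) : Decidable (Spec_nan_expand times out) := by unfold Spec_nan_expand; infer_instance

-- ===== CLAIM (what is proved, stated in full; the proofs are below) =====
def Claim_equal_nan_expand : Prop := ∀ (times : Int), Dom_nan_expand times → Spec_nan_expand times (nan_expand times)

-- ===== LEMMAS AND PROOFS =====

theorem foldl_append_shift (s : String) (l : List String) :
    List.foldl (fun r t => r ++ t) s l = s ++ List.foldl (fun r t => r ++ t) "" l := by
  induction l generalizing s with
  | nil => simp
  | cons a l ih =>
    simp only [List.foldl_cons]
    rw [ih (s ++ a), ih ("" ++ a)]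
    simp [String.append_assoc]

theorem join_cons (s : String) (l : List String) :
    String.join (s :: l) = s ++ String.join l := by
  simp only [String.join, List.foldl_cons]
  rw [foldl_append_shift]
  simp

theorem nan_loop_eq (n : Nat) (hn : 1 ≤ n) :
    (PySem.List.pyRange 0 (n : Int) 1).foldl
      (fun result x => if x == 0 then result ++ "Not a NaN" else "Not a " ++ result) ""
    = String.join (List.replicate n "Not a ") ++ "NaN" := by
  induction n with
  | zero => omega
  | succ m ih =>
    by_cases hm : 1 ≤ m
    · have hcast : ((m + 1 : Nat) : Int) = (m : Int) + 1 := by push_cast; ring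
      rw [hcast, PySem.List.pyRange_one_succ_right (by positivity), List.foldl_append]
      have hne : ¬ ((m : Int) == 0) = true := by simp; omega
      simp only [List.foldl, hne]
      rw [ih hm, List.replicate_succ, join_cons]
      simp [String.append_assoc]
    · have : m = 0 := by omega
      subst this
      decide

theorem nan_expand_eq (times : Int) : nan_expand times = nan_expand_alt times := by
  unfold nan_expand nan_expand_alt
  by_cases h0 : times = 0
  · subst h0; decide
  · by_cases hneg : times ≤ 0
    · simp only [beq_iff_eq, h0, if_pos hneg]
      rw [PySem.List.pyRange_one_eq_nil hneg]
      rfl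
    · have hpos : 0 < times := by omega
      have hcast : ((times.toNat : Nat) : Int) = times := Int.toNat_of_nonneg (by omega)
      have key := nan_loop_eq times.toNat (by omega)
      rw [hcast] at key
      rw [if_neg (by simpa using h0), if_neg hneg]
      exact key

-- ===== VERDICT (by name: the statement is the Claim_ definition above) =====
theorem nan_expand_spec : Claim_equal_nan_expand := by
  intro times _
  exact nan_expand_eq times
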